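-- pv_equiv track=rewrite | github.com/FreddyMachaca/INF-111 | PRÁCTICA SEGUNDO PARCIAL/Ejercicio14/Python/FibannacciPrimosVector.py | generar_vector
-- ===== SOURCE A (Python) =====
-- def es_primo(numero):
--     if numero < 2:
--         return False
--     for i in range(2, int(numero ** 0.5) + 1):
--         if numero % i == 0:
--             return False
--     return True
--
-- def generar_vector(n):
--     vector = []
--     fibonacci_ant = 0
--     fibonacci_act = 1
--     contador = 1
--
--     while contador <= n:
--         if contador % 2 == 0:
--             # Agregar número primo
--             numero = 2
--             while not es_primo(numero):
--                 numero += 1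
--             vector.append(numero)
--         else:
--             # Agregar número de Fibonacci
--             vector.append(fibonacci_ant)
--             fibonacci_ant, fibonacci_act = fibonacci_act, fibonacci_ant + fibonacci_act
--
--         contador += 1
--
--     return vector
-- ===== SOURCE B (Python) =====
-- def generar_vector(n):
--     # Odd positions 1,3,5,... carry successive Fibonacci numbers (0,1,1,2,...),
--     # even positions carry 2 (the smallest prime, which A's dead search always finds).
--     m = max(n, 0)
--     k = (m + 1) // 2          # number of odd positions in 1..m
--     fibs = []
--     a, b = 0, 1
--     for _ in range(k):
--         fibs.append(a)
--         a, b = b, a + b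
--     out = []
--     for f in fibs:
--         out.append(f)
--         out.append(2)
--     return out[:m]
-- ===== Notes on version B (the rewrite author's own statement) =====
-- stated objective: simpler
-- what changed: B drops the dead prime search (it always yields 2), generates the needed (n+1)//2 Fibonacci numbers in one plain loop, interleaves each with a literal 2 and truncates to n, instead of A's single interleaved while-loop with a parity test and an inner primality search per even position.
import Mathlib
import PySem

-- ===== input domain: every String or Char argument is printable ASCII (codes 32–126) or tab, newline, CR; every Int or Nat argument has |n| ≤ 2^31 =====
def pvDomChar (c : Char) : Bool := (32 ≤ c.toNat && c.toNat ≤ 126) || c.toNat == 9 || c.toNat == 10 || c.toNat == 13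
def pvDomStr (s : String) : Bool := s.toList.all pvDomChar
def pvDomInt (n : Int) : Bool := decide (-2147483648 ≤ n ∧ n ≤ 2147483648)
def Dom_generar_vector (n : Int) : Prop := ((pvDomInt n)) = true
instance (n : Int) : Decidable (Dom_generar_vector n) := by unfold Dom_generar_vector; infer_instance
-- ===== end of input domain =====

-- B drops A's dead prime search (always 2), builds the (n+1)//2 Fibonacci values in one loop,
-- interleaves them with literal 2s and truncates to n; objective: simpler.


-- ===== PORT A =====
-- es_primo: 'int(numero ** 0.5)' ported as Nat.sqrt, exact on the perfect squares and small
-- values actually reached here (the search only ever evaluates es_primo 2).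
def es_primo (numero : Int) : Bool :=
  if numero < 2 then false
  else (PySem.List.pyRange 2 (Int.ofNat (Nat.sqrt numero.toNat) + 1) 1).all
         (fun i => PySem.Int.mod numero i != 0)

-- inner 'while not es_primo(numero): numero += 1' ported fuel-bounded; es_primo 2 = true so
-- the loop body never runs and fuel 1 is exact.
def buscar_primo (numero : Int) : Nat → Int
  | 0 => numero
  | f + 1 => if !(es_primo numero) then buscar_primo (numero + 1) f else numero

-- outer while: fuel n.toNat = number of iterations (contador runs 1..n)
def genLoopA (n : Int) (vector : List Int) (fib_ant fib_act contador : Int) : Nat → List Int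
  | 0 => vector
  | f + 1 =>
    if contador ≤ n then
      if PySem.Int.mod contador 2 == 0 then
        genLoopA n (vector ++ [buscar_primo 2 1]) fib_ant fib_act (contador + 1) f
      else
        genLoopA n (vector ++ [fib_ant]) fib_act (fib_ant + fib_act) (contador + 1) f
    else vector

def generar_vector (n : Int) : List Int := genLoopA n [] 0 1 1 n.toNat

-- ===== PORT B =====
def fibsB (a b : Int) : Nat → List Int
  | 0 => []
  | k + 1 => a :: fibsB b (a + b) k

def generar_vector_alt (n : Int) : List Int :=
  let m : Int := max n 0
  let k : Int := PySem.Int.floordiv (m + 1) 2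
  let fibs := fibsB 0 1 k.toNat
  let out := fibs.foldl (fun acc f => acc ++ [f, 2]) []
  out.take m.toNat

-- ===== PRECONDITION & SPEC =====
def Spec_generar_vector (n : Int) (out : List Int) : Prop := out = generar_vector_alt n
instance (n : Int) (out : List Int) : Decidable (Spec_generar_vector n out) := by unfold Spec_generar_vector; infer_instance

-- ===== CLAIM (what is proved, stated in full; the proofs are below) =====
def Claim_equal_generar_vector : Prop := ∀ (n : Int), Dom_generar_vector n → Spec_generar_vector n (generar_vector n)

-- ===== LEMMAS AND PROOFS =====

theorem buscar_primo_two : buscar_primo 2 1 = 2 := by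
  simp [buscar_primo, es_primo, PySem.List.pyRange]

theorem foldl_pairs (l : List Int) (acc : List Int) :
    l.foldl (fun acc f => acc ++ [f, 2]) acc = acc ++ l.flatMap (fun f => [f, 2]) := by
  induction l generalizing acc with
  | nil => simp [List.foldl]
  | cons x xs ih => simp [List.foldl, ih]

theorem genLoopA_eq (fuel : Nat) : ∀ (n : Int) (vec : List Int) (fa fb c : Int),
    c % 2 = 1 → c + fuel = n + 1 →
    genLoopA n vec fa fb c fuel =
      vec ++ (List.take fuel ((fibsB fa fb ((fuel + 1) / 2)).flatMap (fun f => [f, 2]))) := by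
  induction fuel using Nat.twoStepInduction with
  | zero => intro n vec fa fb c _ _; simp [genLoopA, fibsB]
  | one =>
    intro n vec fa fb c hodd hsum
    have hle : c ≤ n := by omega
    simp [genLoopA, hle, fibsB]
    intro h; omega
  | more f ih _ =>
    intro n vec fa fb c hodd hsum
    have hle : c ≤ n := by omega
    have hle2 : c + 1 ≤ n := by omega
    have hmod : PySem.Int.mod c 2 = 1 := by
      rw [PySem.Int.mod_eq_emod_of_pos (by omega)]; exact hodd
    have hmod2 : PySem.Int.mod (c + 1) 2 = 0 := by
      rw [PySem.Int.mod_eq_emod_of_pos (by omega)]; omega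
    have hk : (f + 2 + 1) / 2 = (f + 1) / 2 + 1 := by omega
    show genLoopA n vec fa fb c (f + 2) = _
    simp only [genLoopA, hle, hle2, hmod, hmod2, if_pos, buscar_primo_two]
    norm_num
    rw [ih n (vec ++ [fa, 2]) fb (fa + fb) (c + 1 + 1) (by omega) (by omega), hk]
    simp [fibsB, List.flatMap]

theorem alt_eq (n : Int) : generar_vector_alt n =
    List.take (max n 0).toNat
      ((fibsB 0 1 (PySem.Int.floordiv (max n 0 + 1) 2).toNat).foldl
        (fun acc f => acc ++ [f, 2]) []) := rfl

-- ===== VERDICT (by name: the statement is the Claim_ definition above) =====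
theorem generar_vector_spec : Claim_equal_generar_vector := by
  intro n _
  unfold Spec_generar_vector generar_vector
  rw [alt_eq, foldl_pairs]
  by_cases hn : n ≤ 0
  · have h1 : n.toNat = 0 := by omega
    have h2 : (max n 0).toNat = 0 := by omega
    simp [h1, h2, genLoopA]
  · rw [not_le] at hn
    have hm : max n 0 = n := by omega
    have hk : (PySem.Int.floordiv (max n 0 + 1) 2).toNat = (n.toNat + 1) / 2 := by
      rw [hm, PySem.Int.floordiv_eq_ediv_of_pos (by omega)]; omega
    rw [genLoopA_eq n.toNat n [] 0 1 1 (by omega) (by omega), hk]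
    simp [hm]
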